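-- pv_equiv track=rewrite | github.com/bsb-RickD/SuperNibbly | tools/ImageUtils.py | image_bytes_to_index
-- ===== SOURCE A (Python) =====
-- def image_bytes_to_index(img_bytes, bits_per_pixel):
--     if bits_per_pixel == 8:
--         for b in img_bytes:
--             yield b
--     elif bits_per_pixel == 4:
--         for b in img_bytes:
--             yield b >> 4
--             yield b & 15
--     elif bits_per_pixel == 2:
--         for b in img_bytes:
--             yield b >> 6
--             yield (b & 0b00110000) >> 4
--             yield (b & 0b00001100) >> 2
--             yield (b & 0b00000011)
--     else:
--         raise ValueError("Unexpoected bits per pixel value: %d" % bits_per_pixel)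
-- ===== SOURCE B (Python) =====
-- def image_bytes_to_index(img_bytes, bits_per_pixel):
--     # Arithmetic digit extraction: each byte is a base-(2**bpp) numeral; peel its
--     # digits off the low end with divmod, then emit them reversed (MSB first).
--     if bits_per_pixel not in (2, 4, 8):
--         raise ValueError("Unexpoected bits per pixel value: %d" % bits_per_pixel)
--     base = 1 << bits_per_pixel
--     n = 8 // bits_per_pixel
--     for b in img_bytes:
--         digits = []
--         for _ in range(n - 1):
--             b, r = divmod(b, base)
--             digits.append(r)
--         digits.append(b)
--         yield from reversed(digits)
-- ===== Notes on version B (the rewrite author's own statement) =====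
-- stated objective: alternative
-- what changed: Replaced A's three hardcoded per-bit-depth mask/shift branches by arithmetic digit extraction: each byte is treated as a base-(2**bits_per_pixel) numeral whose digits are peeled off the low end with repeated divmod and emitted reversed; bit depths outside {2,4,8}, where both raise the same ValueError, are excluded by Pre_.
import Mathlib
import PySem

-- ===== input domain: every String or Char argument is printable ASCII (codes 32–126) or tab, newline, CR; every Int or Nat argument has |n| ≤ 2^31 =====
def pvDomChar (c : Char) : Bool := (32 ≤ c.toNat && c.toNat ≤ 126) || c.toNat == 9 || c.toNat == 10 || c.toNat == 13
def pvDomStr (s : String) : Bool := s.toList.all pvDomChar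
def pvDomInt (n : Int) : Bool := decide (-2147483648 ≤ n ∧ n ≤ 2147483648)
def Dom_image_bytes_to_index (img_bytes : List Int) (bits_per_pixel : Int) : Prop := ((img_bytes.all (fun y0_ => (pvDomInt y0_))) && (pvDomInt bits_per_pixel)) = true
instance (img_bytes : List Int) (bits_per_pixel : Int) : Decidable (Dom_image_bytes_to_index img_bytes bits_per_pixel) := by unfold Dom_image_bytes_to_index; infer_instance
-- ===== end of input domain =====

-- B replaces A's three per-bit-depth mask/shift branches by arithmetic digit
-- extraction: each byte is read as a base-(2^bpp) numeral whose digits are peeled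
-- off the low end with divmod and emitted reversed (objective: simpler, same cost).

-- ===== PORT A =====
-- A is a generator: its yielded sequence is ported as a List Int; each
-- 'for b in img_bytes: yield …' becomes a flatMap of the per-byte yields.
-- Python's '>>' / '&' are Lean's '>>>' (Nat exponent) / PySem.Int.band (exact on negatives).
def image_bytes_to_index (img_bytes : List Int) (bits_per_pixel : Int) : List Int :=
  if bits_per_pixel = 8 then
    img_bytes.flatMap (fun b : Int => [b])
  else if bits_per_pixel = 4 then
    img_bytes.flatMap (fun b : Int => [b >>> (4:Nat), PySem.Int.band b 15])
  else if bits_per_pixel = 2 then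
    img_bytes.flatMap (fun b : Int =>
      [b >>> (6:Nat), (PySem.Int.band b 48) >>> (4:Nat), (PySem.Int.band b 12) >>> (2:Nat),
       PySem.Int.band b 3])
  else []  -- Python raises ValueError here; excluded by Pre_

-- ===== PORT B =====
-- the inner 'for _ in range(n-1): b, r = divmod(b, base); digits.append(r)' loop,
-- followed by 'digits.append(b)': digits in append order (low digit first).
def pvDigits (base : Int) : Nat → Int → List Int
  | 0, b => [b]
  | k+1, b => PySem.Int.mod b base :: pvDigits base k (PySem.Int.floordiv b base)

def image_bytes_to_index_alt (img_bytes : List Int) (bits_per_pixel : Int) : List Int :=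
  if bits_per_pixel = 2 ∨ bits_per_pixel = 4 ∨ bits_per_pixel = 8 then
    let base : Int := (1 : Int) <<< bits_per_pixel.toNat
    let n : Nat := (PySem.Int.floordiv 8 bits_per_pixel).toNat
    img_bytes.flatMap (fun b : Int => (pvDigits base (n - 1) b).reverse)
  else []  -- Python raises ValueError here; excluded by Pre_

-- ===== PRECONDITION & SPEC =====
-- Pre_ excludes exactly the bit depths on which A (and B) raise ValueError.
def Pre_image_bytes_to_index (img_bytes : List Int) (bits_per_pixel : Int) : Prop :=
  bits_per_pixel = 2 ∨ bits_per_pixel = 4 ∨ bits_per_pixel = 8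
instance (img_bytes : List Int) (bits_per_pixel : Int) : Decidable (Pre_image_bytes_to_index img_bytes bits_per_pixel) := by unfold Pre_image_bytes_to_index; infer_instance

def pvWitness_image_bytes_to_index : List Int × Int := ([0, 255, 77], 4)

def Spec_image_bytes_to_index (img_bytes : List Int) (bits_per_pixel : Int) (out : List Int) : Prop := out = image_bytes_to_index_alt img_bytes bits_per_pixel
instance (img_bytes : List Int) (bits_per_pixel : Int) (out : List Int) : Decidable (Spec_image_bytes_to_index img_bytes bits_per_pixel out) := by unfold Spec_image_bytes_to_index; infer_instance

-- ===== CLAIM (what is proved, stated in full; the proofs are below) =====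
def Claim_equal_image_bytes_to_index : Prop := ∀ (img_bytes : List Int) (bits_per_pixel : Int), Dom_image_bytes_to_index img_bytes bits_per_pixel → Pre_image_bytes_to_index img_bytes bits_per_pixel → Spec_image_bytes_to_index img_bytes bits_per_pixel (image_bytes_to_index img_bytes bits_per_pixel)

-- ===== LEMMAS AND PROOFS =====

-- bit-slice ↔ arithmetic bridge, Nat level: masking by a shifted all-ones block
-- reads the corresponding base-2^k digit.
theorem nat_mask (n j k : Nat) : n &&& ((2^k - 1) <<< j) = ((n / 2^j) % 2^k) * 2^j := by
  apply Nat.eq_of_testBit_eq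
  intro i
  rw [show ((n / 2^j) % 2^k) * 2^j = ((n / 2^j) % 2^k) <<< j by rw [Nat.shiftLeft_eq]]
  rw [Nat.testBit_and, Nat.testBit_shiftLeft, Nat.testBit_shiftLeft, Nat.testBit_mod_two_pow,
    Nat.testBit_div_two_pow, Nat.testBit_two_pow_sub_one]
  rcases Nat.lt_or_ge i j with h | h
  · simp [Nat.not_le.mpr h]
  · simp only [ge_iff_le, h, decide_true, Bool.true_and]
    by_cases h2 : i - j < k <;> simp [h2, Nat.sub_add_cancel h, Bool.and_comm]

theorem nat_mask3 (n : Nat) : n &&& 3 = n % 4 := by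
  have h := nat_mask n 0 2; norm_num [Nat.shiftLeft_eq] at h; exact h
theorem nat_mask15 (n : Nat) : n &&& 15 = n % 16 := by
  have h := nat_mask n 0 4; norm_num [Nat.shiftLeft_eq] at h; exact h
theorem nat_mask12 (n : Nat) : n &&& 12 = ((n / 4) % 4) * 4 := by
  have h := nat_mask n 2 2; norm_num [Nat.shiftLeft_eq] at h; exact h
theorem nat_mask48 (n : Nat) : n &&& 48 = ((n / 16) % 4) * 16 := by
  have h := nat_mask n 4 2; norm_num [Nat.shiftLeft_eq] at h; exact h

-- the same bridge lifted to Python ints (both signs), at the four masks A uses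
theorem band3 (b : Int) : PySem.Int.band b 3 = b % 4 := by
  rcases Int.lt_or_le b 0 with h | h
  · simp only [PySem.Int.band, if_neg (by omega : ¬ (0:Int) ≤ b), if_pos (by norm_num : (0:Int) ≤ 3)]
    rw [show ((3:Int).toNat) = 3 from rfl, Nat.and_comm, nat_mask3]; omega
  · simp only [PySem.Int.band, if_pos h, if_pos (by norm_num : (0:Int) ≤ 3)]
    rw [show ((3:Int).toNat) = 3 from rfl, nat_mask3]; omega

theorem band15 (b : Int) : PySem.Int.band b 15 = b % 16 := by
  rcases Int.lt_or_le b 0 with h | h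
  · simp only [PySem.Int.band, if_neg (by omega : ¬ (0:Int) ≤ b), if_pos (by norm_num : (0:Int) ≤ 15)]
    rw [show ((15:Int).toNat) = 15 from rfl, Nat.and_comm, nat_mask15]; omega
  · simp only [PySem.Int.band, if_pos h, if_pos (by norm_num : (0:Int) ≤ 15)]
    rw [show ((15:Int).toNat) = 15 from rfl, nat_mask15]; omega

theorem band12 (b : Int) : PySem.Int.band b 12 = ((b / 4) % 4) * 4 := by
  rcases Int.lt_or_le b 0 with h | h
  · simp only [PySem.Int.band, if_neg (by omega : ¬ (0:Int) ≤ b), if_pos (by norm_num : (0:Int) ≤ 12)]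
    rw [show ((12:Int).toNat) = 12 from rfl, Nat.and_comm, nat_mask12]; omega
  · simp only [PySem.Int.band, if_pos h, if_pos (by norm_num : (0:Int) ≤ 12)]
    rw [show ((12:Int).toNat) = 12 from rfl, nat_mask12]; omega

theorem band48 (b : Int) : PySem.Int.band b 48 = ((b / 16) % 4) * 16 := by
  rcases Int.lt_or_le b 0 with h | h
  · simp only [PySem.Int.band, if_neg (by omega : ¬ (0:Int) ≤ b), if_pos (by norm_num : (0:Int) ≤ 48)]
    rw [show ((48:Int).toNat) = 48 from rfl, Nat.and_comm, nat_mask48]; omega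
  · simp only [PySem.Int.band, if_pos h, if_pos (by norm_num : (0:Int) ≤ 48)]
    rw [show ((48:Int).toNat) = 48 from rfl, nat_mask48]; omega

theorem alt_eight (xs : List Int) :
    image_bytes_to_index_alt xs 8 = xs.flatMap (fun b : Int => [b]) := by
  unfold image_bytes_to_index_alt
  rw [if_pos (by norm_num)]
  rfl

theorem alt_four (xs : List Int) :
    image_bytes_to_index_alt xs 4 =
      xs.flatMap (fun b : Int => [b >>> (4:Nat), PySem.Int.band b 15]) := by
  unfold image_bytes_to_index_alt
  rw [if_pos (by norm_num)]
  refine congrArg (fun f => List.flatMap f xs) (funext fun b => ?_)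
  show (pvDigits 16 1 b).reverse = _
  simp only [pvDigits, List.reverse_cons, List.reverse_nil, List.nil_append, List.cons_append]
  rw [band15, Int.shiftRight_eq_div_pow,
    PySem.Int.mod_eq_emod_of_pos (by norm_num), PySem.Int.floordiv_eq_ediv_of_pos (by norm_num)]
  norm_num

theorem alt_two (xs : List Int) :
    image_bytes_to_index_alt xs 2 =
      xs.flatMap (fun b : Int =>
        [b >>> (6:Nat), (PySem.Int.band b 48) >>> (4:Nat), (PySem.Int.band b 12) >>> (2:Nat),
         PySem.Int.band b 3]) := by
  unfold image_bytes_to_index_alt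
  rw [if_pos (by norm_num)]
  refine congrArg (fun f => List.flatMap f xs) (funext fun b => ?_)
  show (pvDigits 4 3 b).reverse = _
  simp only [pvDigits, List.reverse_cons, List.reverse_nil, List.nil_append, List.cons_append]
  rw [band3, band48, band12, Int.shiftRight_eq_div_pow, Int.shiftRight_eq_div_pow,
    Int.shiftRight_eq_div_pow]
  simp only [PySem.Int.mod_eq_emod_of_pos (by norm_num : (0:Int) < 4),
    PySem.Int.floordiv_eq_ediv_of_pos (by norm_num : (0:Int) < 4)]
  norm_num
  constructor <;> omega

-- ===== VERDICT (by name: the statement is the Claim_ definition above) =====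
theorem image_bytes_to_index_spec : Claim_equal_image_bytes_to_index := by
  intro xs bpp _ hpre
  unfold Spec_image_bytes_to_index
  rcases hpre with h | h | h <;> subst h
  · rw [alt_two]; rfl
  · rw [alt_four]; rfl
  · rw [alt_eight]; rfl
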